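-- pv_equiv track=rewrite | github.com/Martin-Floor/prepare_proteins | prepare_proteins/rosettaScripts/selectors.py | rangeExtract
-- ===== SOURCE A (Python) =====
-- def rangeExtract(lst):
--     'Yield 2-tuple ranges or 1-tuple single elements from list of increasing ints'
--     lenlst = len(lst)
--     i = 0
--     while i< lenlst:
--         low = lst[i]
--         while i <lenlst-1 and lst[i]+1 == lst[i+1]: i +=1
--         hi = lst[i]
--         if   hi - low >= 2:
--             yield (low, hi)
--         elif hi - low == 1:
--             yield (low,)
--             yield (hi,)
--         else:
--             yield (low,)
--         i += 1
-- ===== SOURCE B (Python) =====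
-- from itertools import groupby
--
-- def rangeExtract(lst):
--     'Yield 2-tuple ranges or 1-tuple single elements from list of increasing ints'
--     for _, g in groupby(enumerate(lst), key=lambda p: p[1] - p[0]):
--         vals = [v for _, v in g]
--         low, hi = vals[0], vals[-1]
--         if hi - low >= 2:
--             yield (low, hi)
--         elif hi - low == 1:
--             yield (low,)
--             yield (hi,)
--         else:
--             yield (low,)
-- ===== Notes on version B (the rewrite author's own statement) =====
-- stated objective: idiomatic
-- what changed: Replaces the index-based double while-loop with itertools.groupby over enumerate keyed by value-minus-index, which partitions the list into maximal consecutive runs in one declarative pass.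
import Mathlib
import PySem

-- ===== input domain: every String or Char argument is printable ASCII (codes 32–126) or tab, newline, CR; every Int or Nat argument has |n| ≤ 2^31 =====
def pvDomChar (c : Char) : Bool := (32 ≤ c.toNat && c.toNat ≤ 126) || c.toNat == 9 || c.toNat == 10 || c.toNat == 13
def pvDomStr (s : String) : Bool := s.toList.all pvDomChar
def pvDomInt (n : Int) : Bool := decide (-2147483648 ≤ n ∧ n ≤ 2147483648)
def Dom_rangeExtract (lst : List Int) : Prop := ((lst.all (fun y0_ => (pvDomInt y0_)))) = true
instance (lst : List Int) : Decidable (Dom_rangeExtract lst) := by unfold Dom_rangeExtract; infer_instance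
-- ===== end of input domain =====

-- B replaces A's index-based double while-loop by a groupby-style partition into maximal
-- consecutive runs followed by one emit step per run (idiomatic; same cost). A yields a
-- generator; we port the list of yielded tuples (tuples of length 1/2 become Lean lists).

-- ===== PORT A =====
-- inner 'while i < lenlst-1 and lst[i]+1 == lst[i+1]: i += 1' (indices always in range, so
-- List.getD is exact for Python's lst[i] here)
def rangeExtractSkip (lst : List Int) (i : Nat) : Nat :=
  if i + 1 < lst.length ∧ lst.getD i 0 + 1 = lst.getD (i + 1) 0 then
    rangeExtractSkip lst (i + 1)
  else i
termination_by lst.length - i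

theorem rangeExtractSkip_ge (lst : List Int) (i : Nat) : i ≤ rangeExtractSkip lst i := by
  fun_induction rangeExtractSkip lst i with
  | case1 i h ih => omega
  | case2 i _ => omega

-- outer 'while i < lenlst: …'
def rangeExtractGo (lst : List Int) (i : Nat) : List (List Int) :=
  if h : i < lst.length then
    let low := lst.getD i 0
    let j := rangeExtractSkip lst i
    let hi := lst.getD j 0
    (if hi - low ≥ 2 then [[low, hi]]
     else if hi - low = 1 then [[low], [hi]]
     else [[low]]) ++ rangeExtractGo lst (j + 1)
  else []
termination_by lst.length - i
decreasing_by have := rangeExtractSkip_ge lst i; omega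

def rangeExtract (lst : List Int) : List (List Int) := rangeExtractGo lst 0

-- ===== PORT B =====
-- groupby(enumerate(lst), key=p[1]-p[0]) groups adjacent elements with equal value-minus-index,
-- i.e. partitions lst into maximal runs of consecutive integers; ported as this grouping.
def rangeExtractRuns : List Int → List (List Int)
  | [] => []
  | x :: xs =>
    match rangeExtractRuns xs with
    | [] => [[x]]
    | [] :: rest => [x] :: rest   -- unreachable: runs are nonempty
    | (y :: ys) :: rest =>
      if x + 1 = y then (x :: y :: ys) :: rest else [x] :: (y :: ys) :: rest

-- per-group body: vals[0], vals[-1], then the three yield branches (runs are nonempty)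
def rangeExtractEmit (run : List Int) : List (List Int) :=
  let low := run.headD 0
  let hi := run.getLastD 0
  if hi - low ≥ 2 then [[low, hi]]
  else if hi - low = 1 then [[low], [hi]]
  else [[low]]

def rangeExtract_alt (lst : List Int) : List (List Int) :=
  (rangeExtractRuns lst).flatMap rangeExtractEmit

-- ===== PRECONDITION & SPEC =====
def Spec_rangeExtract (lst : List Int) (out : List (List Int)) : Prop := out = rangeExtract_alt lst
instance (lst : List Int) (out : List (List Int)) : Decidable (Spec_rangeExtract lst out) := by unfold Spec_rangeExtract; infer_instance

-- ===== CLAIM (what is proved, stated in full; the proofs are below) =====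
def Claim_equal_rangeExtract : Prop := ∀ (lst : List Int), Dom_rangeExtract lst → Spec_rangeExtract lst (rangeExtract lst)

-- ===== LEMMAS AND PROOFS =====

-- split off the first maximal consecutive run (proof-side mirror of A's inner while)
def pvFirstRun : List Int → List Int × List Int
  | [] => ([], [])
  | [x] => ([x], [])
  | x :: y :: ys =>
    if x + 1 = y then
      let p := pvFirstRun (y :: ys); (x :: p.1, p.2)
    else ([x], y :: ys)

theorem pvFirstRun_cons_head (x : Int) (xs : List Int) :
    ∃ r rest, pvFirstRun (x :: xs) = (x :: r, rest) := by
  cases xs with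
  | nil => exact ⟨[], [], rfl⟩
  | cons y ys =>
    by_cases h : x + 1 = y
    · obtain ⟨r, rest, hr⟩ := pvFirstRun_cons_head y ys
      exact ⟨y :: r, rest, by simp [pvFirstRun, h, hr]⟩
    · exact ⟨[], y :: ys, by simp [pvFirstRun, h]⟩

-- B's runs peel off exactly the first maximal run
theorem runs_eq_firstRun (x : Int) (xs : List Int) :
    rangeExtractRuns (x :: xs) =
      (pvFirstRun (x :: xs)).1 :: rangeExtractRuns (pvFirstRun (x :: xs)).2 := by
  induction xs generalizing x with
  | nil => simp [rangeExtractRuns, pvFirstRun]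
  | cons y ys ih =>
    obtain ⟨r, rest, hr⟩ := pvFirstRun_cons_head y ys
    have hy := ih y
    rw [hr] at hy
    simp only at hy
    by_cases h : x + 1 = y
    · conv_lhs => rw [rangeExtractRuns, hy]
      simp [pvFirstRun, hr, h]
    · conv_lhs => rw [rangeExtractRuns, hy]
      simp [pvFirstRun, hr, h, hy]

-- A's inner while computed on absolute indices matches pvFirstRun on the dropped suffix
theorem skip_firstRun (lst : List Int) (i : Nat) (h : i < lst.length) :
    (pvFirstRun (lst.drop i)).1.getLastD 0 = lst.getD (rangeExtractSkip lst i) 0 ∧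
    (pvFirstRun (lst.drop i)).2 = lst.drop (rangeExtractSkip lst i + 1) := by
  have hd : lst.drop i = lst[i] :: lst.drop (i + 1) := List.drop_eq_getElem_cons h
  have hgi : lst.getD i 0 = lst[i] := by
    simp [List.getD_eq_getElem?_getD, h]
  by_cases hc : i + 1 < lst.length ∧ lst.getD i 0 + 1 = lst.getD (i + 1) 0
  · have hskip : rangeExtractSkip lst i = rangeExtractSkip lst (i + 1) := by
      rw [rangeExtractSkip, if_pos hc]
    have h1 : i + 1 < lst.length := hc.1
    have hd2 : lst.drop (i + 1) = lst[i + 1] :: lst.drop (i + 2) := List.drop_eq_getElem_cons h1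
    have hg1 : lst.getD (i + 1) 0 = lst[i + 1] := by
      simp [List.getD_eq_getElem?_getD, h1]
    have hkey : lst[i] + 1 = lst[i + 1] := by rw [← hgi, ← hg1]; exact hc.2
    obtain ⟨hlast, hrest⟩ := skip_firstRun lst (i + 1) h1
    obtain ⟨r, rest, hr⟩ := pvFirstRun_cons_head lst[i + 1] (lst.drop (i + 2))
    rw [← hd2] at hr
    rw [hr] at hlast hrest
    simp only at hlast hrest
    rw [hskip, hd, hd2, pvFirstRun, if_pos hkey, ← hd2, hr]
    exact ⟨by simpa using hlast, hrest⟩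
  · have hskip : rangeExtractSkip lst i = i := by rw [rangeExtractSkip, if_neg hc]
    rw [hskip]
    rcases Nat.lt_or_ge (i + 1) lst.length with h1 | h1
    · have hd2 : lst.drop (i + 1) = lst[i + 1] :: lst.drop (i + 2) := List.drop_eq_getElem_cons h1
      have hg1 : lst.getD (i + 1) 0 = lst[i + 1] := by
        simp [List.getD_eq_getElem?_getD, h1]
      have hne : ¬ lst[i] + 1 = lst[i + 1] := by
        intro hk
        exact hc ⟨h1, by rw [hgi, hg1]; exact hk⟩
      rw [hd, hd2, pvFirstRun, if_neg hne, ← hd2]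
      exact ⟨by rw [hgi]; simp, rfl⟩
    · have hd2 : lst.drop (i + 1) = [] := List.drop_eq_nil_of_le h1
      rw [hd, hd2, pvFirstRun]
      exact ⟨by rw [hgi]; simp, by simp [hd2]⟩
termination_by lst.length - i

theorem go_eq_alt (lst : List Int) (i : Nat) :
    rangeExtractGo lst i = (rangeExtractRuns (lst.drop i)).flatMap rangeExtractEmit := by
  by_cases h : i < lst.length
  · have hd : lst.drop i = lst[i] :: lst.drop (i + 1) := List.drop_eq_getElem_cons h
    have hgi : lst.getD i 0 = lst[i] := by
      simp [List.getD_eq_getElem?_getD, h]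
    have hge := rangeExtractSkip_ge lst i
    have ih := go_eq_alt lst (rangeExtractSkip lst i + 1)
    obtain ⟨hlast, hrest⟩ := skip_firstRun lst i h
    obtain ⟨r, rest, hr⟩ := pvFirstRun_cons_head lst[i] (lst.drop (i + 1))
    rw [← hd] at hr
    rw [hr] at hlast hrest
    simp only at hlast hrest
    rw [rangeExtractGo]
    simp only [dif_pos h]
    rw [hd, runs_eq_firstRun, ← hd, hr]
    simp only
    rw [List.flatMap_cons, ih, hrest]
    congr 1
    rw [rangeExtractEmit]
    simp only [List.headD_cons, hgi, hlast]
  · have hd : lst.drop i = [] := List.drop_eq_nil_of_le (by omega)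
    rw [rangeExtractGo, hd]
    simp [h, rangeExtractRuns]
termination_by lst.length - i
decreasing_by have := rangeExtractSkip_ge lst i; omega

-- ===== VERDICT (by name: the statement is the Claim_ definition above) =====
theorem rangeExtract_spec : Claim_equal_rangeExtract := by
  intro lst _
  show rangeExtract lst = rangeExtract_alt lst
  rw [rangeExtract, rangeExtract_alt, go_eq_alt, List.drop_zero]
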